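-- pv_equiv track=rewrite | github.com/netra-systems/zen | scripts/compliance/improved_ssot_checker.py | classify_component
-- ===== SOURCE A (Python) =====
-- def classify_component(rel_path: str, full_path: str) -> str:
--     """Classify component based on architectural patterns"""
--     path_lower = rel_path.lower()
--
--     # Interface/Protocol files
--     if any(keyword in path_lower for keyword in ['protocol', 'interface', 'contract']):
--         return 'interfaces'
--
--     # Type definition files
--     if any(keyword in path_lower for keyword in ['types', 'type_def', 'typing']):
--         return 'types'
--
--     # Factory files
--     if any(keyword in path_lower for keyword in ['factory', 'creator', 'builder']):
--         return 'factories'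
--
--     # Bridge files
--     if any(keyword in path_lower for keyword in ['bridge', 'adapter', 'connector']):
--         return 'bridges'
--
--     # Implementation files
--     if any(keyword in path_lower for keyword in ['manager', 'service', 'handler', 'engine']):
--         return 'implementations'
--
--     # Utility files
--     if any(keyword in path_lower for keyword in ['util', 'helper', 'common', 'shared']):
--         return 'utilities'
--
--     return 'implementations'  # Default classification
-- ===== SOURCE B (Python) =====
-- # Reverse-priority single pass: one flat (keyword, category) list in REVERSE
-- # priority order, scanned once with a last-write-wins accumulator, so the
-- # highest-priority matching category overwrites last; no early returns.
-- REVERSED_KEYWORDS = [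
--     ('shared', 'utilities'), ('common', 'utilities'), ('helper', 'utilities'), ('util', 'utilities'),
--     ('engine', 'implementations'), ('handler', 'implementations'),
--     ('service', 'implementations'), ('manager', 'implementations'),
--     ('connector', 'bridges'), ('adapter', 'bridges'), ('bridge', 'bridges'),
--     ('builder', 'factories'), ('creator', 'factories'), ('factory', 'factories'),
--     ('typing', 'types'), ('type_def', 'types'), ('types', 'types'),
--     ('contract', 'interfaces'), ('interface', 'interfaces'), ('protocol', 'interfaces'),
-- ]
--
-- def classify_component(rel_path: str, full_path: str) -> str:
--     path_lower = rel_path.lower()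
--     result = 'implementations'
--     for kw, cat in REVERSED_KEYWORDS:
--         if kw in path_lower:
--             result = cat
--     return result
-- ===== Notes on version B (the rewrite author's own statement) =====
-- stated objective: alternative
-- what changed: Replaced the six early-return any() branches by one flat (keyword, category) list in reverse priority order scanned in a single last-write-wins accumulator pass (the highest-priority match overwrites last; the default is the initial accumulator).
import Mathlib
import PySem

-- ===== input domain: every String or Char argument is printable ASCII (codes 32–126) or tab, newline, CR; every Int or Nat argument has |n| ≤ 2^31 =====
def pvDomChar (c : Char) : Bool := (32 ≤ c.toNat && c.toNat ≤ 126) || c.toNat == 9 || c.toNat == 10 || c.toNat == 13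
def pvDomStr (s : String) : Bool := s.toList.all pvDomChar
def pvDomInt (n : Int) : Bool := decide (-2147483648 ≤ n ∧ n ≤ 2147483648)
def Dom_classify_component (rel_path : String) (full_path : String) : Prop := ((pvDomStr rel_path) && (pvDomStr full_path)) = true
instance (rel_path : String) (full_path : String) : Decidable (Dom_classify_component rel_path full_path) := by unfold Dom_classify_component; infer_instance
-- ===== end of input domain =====

-- B replaces A's six early-return any() branches by one flat reverse-priority (keyword, category) list scanned in a single last-write-wins accumulator pass; same return values, different decomposition.


-- ===== PORT A =====
def classify_component (rel_path : String) (full_path : String) : String :=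
  let path_lower := PySem.Str.lower rel_path
  if ["protocol", "interface", "contract"].any (fun k => PySem.Str.isIn k path_lower) then
    "interfaces"
  else if ["types", "type_def", "typing"].any (fun k => PySem.Str.isIn k path_lower) then
    "types"
  else if ["factory", "creator", "builder"].any (fun k => PySem.Str.isIn k path_lower) then
    "factories"
  else if ["bridge", "adapter", "connector"].any (fun k => PySem.Str.isIn k path_lower) then
    "bridges"
  else if ["manager", "service", "handler", "engine"].any (fun k => PySem.Str.isIn k path_lower) then
    "implementations"
  else if ["util", "helper", "common", "shared"].any (fun k => PySem.Str.isIn k path_lower) then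
    "utilities"
  else
    "implementations"

-- ===== PORT B =====
def reversedKeywords : List (String × String) :=
  [("shared", "utilities"), ("common", "utilities"), ("helper", "utilities"), ("util", "utilities"),
   ("engine", "implementations"), ("handler", "implementations"),
   ("service", "implementations"), ("manager", "implementations"),
   ("connector", "bridges"), ("adapter", "bridges"), ("bridge", "bridges"),
   ("builder", "factories"), ("creator", "factories"), ("factory", "factories"),
   ("typing", "types"), ("type_def", "types"), ("types", "types"),
   ("contract", "interfaces"), ("interface", "interfaces"), ("protocol", "interfaces")]

def classify_component_alt (rel_path : String) (full_path : String) : String :=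
  let path_lower := PySem.Str.lower rel_path
  reversedKeywords.foldl
    (fun result e => if PySem.Str.isIn e.1 path_lower then e.2 else result)
    "implementations"

-- ===== PRECONDITION & SPEC =====
def Spec_classify_component (rel_path : String) (full_path : String) (out : String) : Prop := out = classify_component_alt rel_path full_path
instance (rel_path : String) (full_path : String) (out : String) : Decidable (Spec_classify_component rel_path full_path out) := by unfold Spec_classify_component; infer_instance

-- ===== CLAIM (what is proved, stated in full; the proofs are below) =====
def Claim_equal_classify_component : Prop := ∀ (rel_path : String) (full_path : String), Dom_classify_component rel_path full_path → Spec_classify_component rel_path full_path (classify_component rel_path full_path)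

-- ===== LEMMAS AND PROOFS =====
-- distribute an if over a Bool disjunction (turns A's any-branches into a keyword chain)
theorem pv_if_or {α : Type} (a b : Bool) (x y : α) :
    (if (a || b) = true then x else y) = if a = true then x else if b = true then x else y := by
  cases a <;> cases b <;> rfl

-- ===== VERDICT (by name: the statement is the Claim_ definition above) =====
theorem classify_component_spec : Claim_equal_classify_component := by
  intro rel_path full_path _
  unfold Spec_classify_component classify_component classify_component_alt reversedKeywords
  simp only [List.any_cons, List.any_nil, Bool.or_false, List.foldl_cons, List.foldl_nil, pv_if_or]
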